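-- pv_equiv track=rewrite | github.com/seantyh/gran | gran/utils.py | get_word_boundary_index
-- ===== SOURCE A (Python) =====
-- def get_word_boundary_index(ngram):
--     tokens = ngram.split('|')
--     token_len = [len(x) for x in tokens]
--     token_delims = [0]
--     for len_x in token_len:
--         last_delim = token_delims[-1] + len_x
--         token_delims.append(last_delim)
--     token_delims = token_delims[1:-1]
--     return token_delims
-- ===== SOURCE B (Python) =====
-- def get_word_boundary_index(ngram):
--     res = []
--     count = 0
--     for i, ch in enumerate(ngram):
--         if ch == '|':
--             res.append(i - count)
--             count += 1
--     return res
-- ===== Notes on version B (the rewrite author's own statement) =====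
-- stated objective: simpler
-- what changed: Replaces the split/token-length/prefix-sum pipeline with a single pass over the characters that appends i - (number of '|' seen so far) at each delimiter index i.
import Mathlib
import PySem

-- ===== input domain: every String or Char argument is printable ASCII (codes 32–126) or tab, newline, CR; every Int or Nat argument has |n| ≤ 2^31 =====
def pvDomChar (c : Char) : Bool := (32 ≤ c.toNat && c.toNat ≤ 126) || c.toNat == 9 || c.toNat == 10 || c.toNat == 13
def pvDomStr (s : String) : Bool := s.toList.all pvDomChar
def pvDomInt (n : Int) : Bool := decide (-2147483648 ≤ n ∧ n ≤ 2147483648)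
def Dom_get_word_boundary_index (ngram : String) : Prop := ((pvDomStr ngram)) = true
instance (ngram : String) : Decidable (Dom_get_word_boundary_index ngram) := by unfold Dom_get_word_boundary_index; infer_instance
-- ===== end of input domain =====

-- B replaces A's split/token-length/prefix-sum pipeline with a single character pass (simpler decomposition, same cost).

-- ===== PORT A =====
def get_word_boundary_index (ngram : String) : List Int :=
  let tokens := PySem.Chars.splitOn ngram.toList ['|']
  let token_len : List Int := tokens.map (fun x => (PySem.Chars.len x : Int))
  let token_delims : List Int := token_len.foldl
    (fun acc len_x => acc ++ [PySem.List.pyGetD acc (-1) 0 + len_x]) [0]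
  PySem.List.slice token_delims (some 1) (some (-1))

-- ===== PORT B =====
def get_word_boundary_index_alt (ngram : String) : List Int :=
  ((PySem.List.enumerate ngram.toList 0).foldl
    (fun st p => if p.2 == '|' then (st.1 ++ [p.1 - st.2], st.2 + 1) else st)
    (([] : List Int), (0 : Int))).1

-- ===== PRECONDITION & SPEC =====
def Spec_get_word_boundary_index (ngram : String) (out : List Int) : Prop := out = get_word_boundary_index_alt ngram
instance (ngram : String) (out : List Int) : Decidable (Spec_get_word_boundary_index ngram out) := by unfold Spec_get_word_boundary_index; infer_instance

-- ===== CLAIM (what is proved, stated in full; the proofs are below) =====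
def Claim_equal_get_word_boundary_index : Prop := ∀ (ngram : String), Dom_get_word_boundary_index ngram → Spec_get_word_boundary_index ngram (get_word_boundary_index ngram)

-- ===== LEMMAS AND PROOFS =====

/-- Spec splitter on '|': `tokSpec pre l` = the tokens of `pre ++ l` when `pre` holds the
current partial token. -/
def tokSpec : List Char → List Char → List (List Char)
  | pre, [] => [pre]
  | pre, c :: rest => if c = '|' then pre :: tokSpec [] rest else tokSpec (pre ++ [c]) rest

/-- Running prefix sums starting from `b` (the sums themselves, left to right). -/
def sums (b : Int) : List Int → List Int
  | [] => []
  | x :: xs => (b + x) :: sums (b + x) xs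

theorem go_eq (fuel : Nat) (l cur : List Char) (acc : List (List Char)) (h : l.length < fuel) :
    PySem.Chars.splitOn.go ['|'] fuel l cur acc = acc.reverse ++ tokSpec cur.reverse l := by
  induction fuel generalizing l cur acc with
  | zero => omega
  | succ fuel ih =>
    cases l with
    | nil => simp [PySem.Chars.splitOn.go, tokSpec]
    | cons c rest =>
      simp only [PySem.Chars.splitOn.go, List.isPrefixOf]
      by_cases hc : c = '|'
      · subst hc
        simp only [BEq.rfl, Bool.true_and, if_pos]
        rw [ih _ _ _ (by simpa using Nat.lt_of_succ_lt_succ h)]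
        simp [tokSpec]
      · rw [if_neg (by simp; exact fun hh => hc hh.symm)]
        rw [ih _ _ _ (by simpa using Nat.lt_of_succ_lt_succ h)]
        simp [tokSpec, hc]

theorem splitOn_eq (s : List Char) : PySem.Chars.splitOn s ['|'] = tokSpec [] s := by
  have := go_eq (s.length + 1) s [] [] (by omega)
  simpa [PySem.Chars.splitOn] using this

theorem tokSpec_ne_nil (pre l : List Char) : tokSpec pre l ≠ [] := by
  induction l generalizing pre with
  | nil => simp [tokSpec]
  | cons c rest ih => simp only [tokSpec]; split <;> simp [ih]

theorem foldA (lens : List Int) (ys : List Int) (b : Int) :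
    lens.foldl (fun acc x => acc ++ [PySem.List.pyGetD acc (-1) 0 + x]) (ys ++ [b])
      = ys ++ b :: sums b lens := by
  induction lens generalizing ys b with
  | nil => simp [sums]
  | cons x xs ih =>
    simp only [List.foldl_cons]
    have hlast : PySem.List.pyGetD (ys ++ [b]) (-1) 0 = b := by
      simp [PySem.List.pyGetD, PySem.List.pyGet?_neg_one]
    rw [hlast]
    have := ih (ys ++ [b]) (b + x)
    simpa [sums] using this

theorem sliceA (ys : List Int) :
    PySem.List.slice ((0 : Int) :: ys) (some 1) (some (-1)) = ys.dropLast := by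
  simp [PySem.List.slice, PySem.List.clampIdx, List.dropLast_eq_take]
  split_ifs <;> omega

theorem scanB (l : List Char) (pre : List Char) (i cnt : Int) (res : List Int) :
    ((PySem.List.enumerate l i).foldl
      (fun st p => if p.2 == '|' then (st.1 ++ [p.1 - st.2], st.2 + 1) else st)
      (res, cnt)).1
    = res ++ (sums (i - cnt - pre.length) ((tokSpec pre l).map (fun t => (t.length : Int)))).dropLast := by
  induction l generalizing pre i cnt res with
  | nil => simp [tokSpec, sums]
  | cons c rest ih =>
    rw [PySem.List.enumerate_cons]
    simp only [List.foldl_cons]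
    by_cases hc : c = '|'
    · subst hc
      simp only [BEq.rfl, if_pos]
      rw [ih [] (i+1) (cnt+1) (res ++ [i - cnt])]
      have hne : (tokSpec [] rest).map (fun t => (t.length : Int)) ≠ [] := by
        simp [tokSpec_ne_nil]
      simp only [tokSpec]
      cases h : (tokSpec [] rest).map (fun t => (t.length : Int)) with
      | nil => exact absurd h hne
      | cons y ys => simp [sums, List.dropLast_cons_of_ne_nil, h]
    · rw [if_neg (by simp [hc])]
      rw [ih (pre ++ [c]) (i+1) cnt res]
      simp [tokSpec, hc]
      ring_nf

-- ===== VERDICT (by name: the statement is the Claim_ definition above) =====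
theorem get_word_boundary_index_spec : Claim_equal_get_word_boundary_index := by
  intro ngram _
  unfold Spec_get_word_boundary_index get_word_boundary_index get_word_boundary_index_alt
  rw [splitOn_eq, scanB ngram.toList [] 0 0 []]
  show PySem.List.slice
      (((tokSpec [] ngram.toList).map (fun x => (PySem.Chars.len x : Int))).foldl
        (fun acc len_x => acc ++ [PySem.List.pyGetD acc (-1) 0 + len_x]) [0]) (some 1) (some (-1)) = _
  have hfold := foldA ((tokSpec [] ngram.toList).map (fun x => (PySem.Chars.len x : Int))) [] 0
  simp only [List.nil_append] at hfold
  rw [hfold, sliceA]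
  simp
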